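-- pv_equiv track=rewrite | github.com/rosinaSav/DFE_paper_repo | conservation.py | fill_codons
-- ===== SOURCE A (Python) =====
-- def fill_codons(motif_positions, two_fold, four_fold):
--     '''
--     Given a list of  motif hit positions, transform it to give a list of full codons.
--     NB! This works either if you have blocks of contiguous bases (i.e. full motif hits) or fourfold degenerate positions, that is to say, there are never two adjacent positions.
--     Anything else and this function will produce nonsense.
--     '''
--     motif_positions = [int(i) for i in motif_positions]
--     positions_number = len(motif_positions)
--     to_change_two_fold = []
--     to_change_four_fold = []
--     final_pos = []
--     for i, j in enumerate(motif_positions):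
--         final_pos.append(j)
--         if i == 0 or (j-motif_positions[i-1]) != 1:#if it's the first motif hit base in the sequence or if it's the first one in a block (the previous motif hit base wasn't contiguous)
--             #if it's the second base of a codon
--             if j%3 == 1:
--                 #add the preceding base
--                 del final_pos[-1]
--                 final_pos.append(j-1)
--                 final_pos.append(j)
--                 #if the base just added is a two-fold degenerate site in a Leucine/Arginine codon, store the position
--                 if j-1 in two_fold:
--                     to_change_two_fold.append(j-1)
--                 #if it is a four-fold degenerate site in a Leu/Arg codon, store the position in another list
--                 elif j-1 in four_fold:
--                     to_change_four_fold.append(j-1)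
--             #if it's the third base of a codon
--             elif j%3 == 2:
--                 #add the two preceding bases
--                 del final_pos[-1]
--                 final_pos.extend([j-2,j-1, j])
--                 if j-2 in two_fold:
--                     to_change_two_fold.append(j-2)
--                 elif j-2 in four_fold:
--                     to_change_four_fold.append(j-2)
--         elif (i+1 == positions_number) or (motif_positions[i+1] - j != 1):#if it's the last motif hit base of the sequence or the last one of a contiguous block
--             #if it's the first base of a codon
--             if j%3 == 0:
--                 #remove that base
--                 del final_pos[-1]
--             #if it's the second base of a codon
--             elif j%3 == 1:
--                 #remove both that and the preceding base
--                 del final_pos[-1]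
--                 del final_pos[-1]
--     return(final_pos, to_change_two_fold, to_change_four_fold)
-- ===== SOURCE B (Python) =====
-- def fill_codons(motif_positions, two_fold, four_fold):
--     '''Block-based re-implementation: split positions into maximal runs of
--     consecutive integers and emit each block's codon expansion in one go.'''
--     xs = [int(i) for i in motif_positions]
--     n = len(xs)
--     final_pos, to_change_two_fold, to_change_four_fold = [], [], []
--     i = 0
--     while i < n:
--         # find the end of the maximal consecutive run starting at i
--         k = i + 1
--         while k < n and xs[k] - xs[k - 1] == 1:
--             k += 1
--         block = xs[i:k]
--         s, e = block[0], block[-1]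
--         r = s % 3
--         if r == 1:
--             head, c = [s - 1, s], s - 1
--         elif r == 2:
--             head, c = [s - 2, s - 1, s], s - 2
--         else:
--             head, c = [s], None
--         if c is not None:
--             if c in two_fold:
--                 to_change_two_fold.append(c)
--             elif c in four_fold:
--                 to_change_four_fold.append(c)
--         out = head + block[1:]
--         if len(block) >= 2:
--             if e % 3 == 0:
--                 out = out[:-1]
--             elif e % 3 == 1:
--                 out = out[:-2]
--         final_pos.extend(out)
--         i = k
--     return (final_pos, to_change_two_fold, to_change_four_fold)
-- ===== Notes on version B (the rewrite author's own statement) =====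
-- stated objective: alternative
-- what changed: A walks positions one by one with lookbehind/lookahead index tests and in-place del; B first splits the positions into maximal consecutive runs and emits each block's codon expansion (head expansion + interior + end trim) in one go.
import Mathlib
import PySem

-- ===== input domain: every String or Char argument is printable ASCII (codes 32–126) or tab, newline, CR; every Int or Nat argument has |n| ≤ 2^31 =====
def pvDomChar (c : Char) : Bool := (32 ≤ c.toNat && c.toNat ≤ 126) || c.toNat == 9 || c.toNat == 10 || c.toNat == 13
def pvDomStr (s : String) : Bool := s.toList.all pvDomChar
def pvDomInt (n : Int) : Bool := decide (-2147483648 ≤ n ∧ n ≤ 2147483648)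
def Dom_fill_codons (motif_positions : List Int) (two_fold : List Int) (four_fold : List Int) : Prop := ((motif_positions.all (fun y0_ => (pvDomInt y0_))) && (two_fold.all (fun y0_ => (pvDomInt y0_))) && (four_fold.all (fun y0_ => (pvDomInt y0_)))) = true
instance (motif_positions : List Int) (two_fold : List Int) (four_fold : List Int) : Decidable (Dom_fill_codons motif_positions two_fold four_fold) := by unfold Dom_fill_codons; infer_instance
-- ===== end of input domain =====

-- B replaces A's per-element walk (lookbehind/lookahead index tests, in-place del) by splitting
-- the positions into maximal consecutive runs and emitting each block's codon expansion in one go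
-- (alternative decomposition, same asymptotic cost).


-- ===== PORT A =====
-- the body of A's "first base of a block" branch (append j, expand to codon start, classify)
def fcStartB (two_fold four_fold : List Int) (j : Int) (st : List Int × List Int × List Int) :
    List Int × List Int × List Int :=
  let fp := st.1 ++ [j]
  if PySem.Int.mod j 3 = 1 then
    let fp2 := fp.dropLast ++ [j - 1, j]
    if j - 1 ∈ two_fold then (fp2, st.2.1 ++ [j - 1], st.2.2)
    else if j - 1 ∈ four_fold then (fp2, st.2.1, st.2.2 ++ [j - 1])
    else (fp2, st.2.1, st.2.2)
  else if PySem.Int.mod j 3 = 2 then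
    let fp2 := fp.dropLast ++ [j - 2, j - 1, j]
    if j - 2 ∈ two_fold then (fp2, st.2.1 ++ [j - 2], st.2.2)
    else if j - 2 ∈ four_fold then (fp2, st.2.1, st.2.2 ++ [j - 2])
    else (fp2, st.2.1, st.2.2)
  else (fp, st.2.1, st.2.2)

-- the body of A's "last base of a block" branch (append j, then del trailing base(s))
def fcEndB (j : Int) (st : List Int × List Int × List Int) : List Int × List Int × List Int :=
  let fp := st.1 ++ [j]
  if PySem.Int.mod j 3 = 0 then (fp.dropLast, st.2.1, st.2.2)
  else if PySem.Int.mod j 3 = 1 then (fp.dropLast.dropLast, st.2.1, st.2.2)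
  else (fp, st.2.1, st.2.2)

-- one iteration of A's `for i, j in enumerate(motif_positions)` loop
def fcStep (mp two_fold four_fold : List Int) (n : Int)
    (st : List Int × List Int × List Int) (ij : Int × Int) : List Int × List Int × List Int :=
  let i := ij.1
  let j := ij.2
  if i = 0 ∨ j - ((PySem.List.pyGet? mp (i - 1)).getD 0) ≠ 1 then
    fcStartB two_fold four_fold j st
  else if i + 1 = n ∨ ((PySem.List.pyGet? mp (i + 1)).getD 0) - j ≠ 1 then
    fcEndB j st
  else (st.1 ++ [j], st.2.1, st.2.2)

def fill_codons (motif_positions : List Int) (two_fold : List Int) (four_fold : List Int) :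
    List Int × List Int × List Int :=
  let mp := motif_positions.map (fun i => i)  -- [int(i) for i in …] : identity on ints
  let n : Int := mp.length
  (PySem.List.enumerate mp 0).foldl (fcStep mp two_fold four_fold n) ([], [], [])

-- ===== PORT B =====
-- Source B's inner `while k < n and xs[k] - xs[k-1] == 1` scan: the maximal consecutive run after p,
-- and the leftover suffix
def fcTakeRun : Int → List Int → List Int × List Int
  | _, [] => ([], [])
  | p, y :: ys =>
    if y - p = 1 then
      let pr := fcTakeRun y ys
      (y :: pr.1, pr.2)
    else ([], y :: ys)

theorem fcTakeRun_len (p : Int) (xs : List Int) : (fcTakeRun p xs).2.length ≤ xs.length := by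
  induction xs generalizing p with
  | nil => simp [fcTakeRun]
  | cons y ys ih =>
    simp only [fcTakeRun]
    split
    · exact Nat.le_succ_of_le (ih y)
    · simp

-- Source B's outer while loop: the list of maximal consecutive blocks
def fcRuns : List Int → List (List Int)
  | [] => []
  | x :: xs => (x :: (fcTakeRun x xs).1) :: fcRuns (fcTakeRun x xs).2
termination_by l => l.length
decreasing_by exact Nat.lt_succ_of_le (fcTakeRun_len x xs)

-- Source B's per-block body: head expansion + classification + interior + end trim
def fcBlock (two_fold four_fold : List Int) (st : List Int × List Int × List Int)
    (b : List Int) : List Int × List Int × List Int :=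
  let s := b.headD 0
  let e := b.getLastD 0
  let hc : List Int × Option Int :=
    if PySem.Int.mod s 3 = 1 then ([s - 1, s], some (s - 1))
    else if PySem.Int.mod s 3 = 2 then ([s - 2, s - 1, s], some (s - 2))
    else ([s], none)
  let t24 : List Int × List Int :=
    match hc.2 with
    | none => (st.2.1, st.2.2)
    | some c =>
      if c ∈ two_fold then (st.2.1 ++ [c], st.2.2)
      else if c ∈ four_fold then (st.2.1, st.2.2 ++ [c])
      else (st.2.1, st.2.2)
  let outt := hc.1 ++ b.tail
  let outt :=
    if 2 ≤ b.length then
      if PySem.Int.mod e 3 = 0 then outt.dropLast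
      else if PySem.Int.mod e 3 = 1 then outt.dropLast.dropLast
      else outt
    else outt
  (st.1 ++ outt, t24.1, t24.2)

def fill_codons_alt (motif_positions : List Int) (two_fold : List Int) (four_fold : List Int) :
    List Int × List Int × List Int :=
  let xs := motif_positions.map (fun i => i)  -- [int(i) for i in …] : identity on ints
  (fcRuns xs).foldl (fcBlock two_fold four_fold) ([], [], [])

-- ===== PRECONDITION & SPEC =====
def Spec_fill_codons (motif_positions : List Int) (two_fold : List Int) (four_fold : List Int) (out : List Int × List Int × List Int) : Prop := out = fill_codons_alt motif_positions two_fold four_fold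
instance (motif_positions : List Int) (two_fold : List Int) (four_fold : List Int) (out : List Int × List Int × List Int) : Decidable (Spec_fill_codons motif_positions two_fold four_fold out) := by unfold Spec_fill_codons; infer_instance

-- ===== CLAIM (what is proved, stated in full; the proofs are below) =====
def Claim_equal_fill_codons : Prop := ∀ (motif_positions : List Int) (two_fold : List Int) (four_fold : List Int), Dom_fill_codons motif_positions two_fold four_fold → Spec_fill_codons motif_positions two_fold four_fold (fill_codons motif_positions two_fold four_fold)

-- ===== LEMMAS AND PROOFS =====

-- A's loop re-expressed as structural recursion carrying the previous element (the lookbehind)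
-- and reading the lookahead from the head of the remaining list.
def fcRecStep (two_fold four_fold : List Int) (prev : Option Int) (j : Int) (rest : List Int)
    (st : List Int × List Int × List Int) : List Int × List Int × List Int :=
  match prev with
  | none => fcStartB two_fold four_fold j st
  | some p =>
    if j - p ≠ 1 then fcStartB two_fold four_fold j st
    else if rest = [] ∨ rest.headD 0 - j ≠ 1 then fcEndB j st
    else (st.1 ++ [j], st.2.1, st.2.2)

def fcRecA (two_fold four_fold : List Int) : Option Int → List Int →
    List Int × List Int × List Int → List Int × List Int × List Int
  | _, [], st => st
  | prev, j :: rest, st =>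
    fcRecA two_fold four_fold (some j) rest (fcRecStep two_fold four_fold prev j rest st)

-- the end trim as a function of the block's last element
def fcEndAdjust (e : Int) (l : List Int) : List Int :=
  if PySem.Int.mod e 3 = 0 then l.dropLast
  else if PySem.Int.mod e 3 = 1 then l.dropLast.dropLast
  else l

-- a run of consecutive integers after p
def fcConsec : Int → List Int → Prop
  | _, [] => True
  | p, y :: ys => y = p + 1 ∧ fcConsec y ys

theorem fcEndB_eq (j : Int) (st : List Int × List Int × List Int) :
    fcEndB j st = (fcEndAdjust j (st.1 ++ [j]), st.2.1, st.2.2) := by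
  simp only [fcEndB, fcEndAdjust]
  split_ifs <;> rfl

-- one step of A's indexed fold is one step of the prev/next recursion
theorem fcStep_eq (two_fold four_fold pre rest : List Int) (j : Int)
    (st : List Int × List Int × List Int) :
    fcStep (pre ++ j :: rest) two_fold four_fold ((pre ++ j :: rest).length : Int) st
      ((pre.length : Int), j)
    = fcRecStep two_fold four_fold pre.getLast? j rest st := by
  rcases List.eq_nil_or_concat pre with h | ⟨pre', p, h⟩ <;> subst h
  · simp [fcStep, fcRecStep]
  · simp only [List.concat_eq_append]
    rw [List.getLast?_concat]
    have hg1 : PySem.List.pyGet? ((pre' ++ [p]) ++ j :: rest)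
        (((pre' ++ [p]).length : Int) - 1) = some p := by
      have h1 : ((pre' ++ [p]).length : Int) - 1 = (pre'.length : Int) := by
        simp
      rw [List.append_assoc, List.singleton_append, h1]
      exact PySem.List.pyGet?_append_length pre' (j :: rest) p
    have hne : ((((pre' ++ [p]).length : Int)) = 0) = False := by
      have hz : (pre' ++ [p]).length ≠ 0 := by simp
      exact eq_false (fun hc => hz (by exact_mod_cast hc))
    simp only [fcStep, fcRecStep, hg1, Option.getD_some, hne, false_or]
    by_cases hj : j - p ≠ 1
    · simp [hj]
    · simp only [if_neg hj]
      cases rest with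
      | nil =>
        have hc1 : ((pre' ++ [p]).length : Int) + 1
            = (((pre' ++ [p]) ++ j :: ([] : List Int)).length : Int) := by
          push_cast [List.length_append, List.length_cons, List.length_nil]
          ring
        rw [if_pos (Or.inl hc1), if_pos (Or.inl rfl)]
      | cons y rest' =>
        have hg2 : PySem.List.pyGet? ((pre' ++ [p]) ++ j :: y :: rest')
            (((pre' ++ [p]).length : Int) + 1) = some y := by
          have h2 := PySem.List.pyGet?_append_right (pre' ++ [p]) (j :: y :: rest') 1
          simpa using h2
        have hcond : ((((pre' ++ [p]).length : Int) + 1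
              = (((pre' ++ [p]) ++ j :: y :: rest').length : Int))
            ∨ ((PySem.List.pyGet? ((pre' ++ [p]) ++ j :: y :: rest')
                (((pre' ++ [p]).length : Int) + 1)).getD 0) - j ≠ 1)
            ↔ (y - j ≠ 1) := by
          rw [hg2]
          simp only [Option.getD_some]
          constructor
          · rintro (h | h)
            · exfalso
              push_cast [List.length_append, List.length_cons, List.length_nil] at h
              omega
            · exact h
          · exact Or.inr
        have hr : (((y :: rest' : List Int)) = [] ∨ (y :: rest').headD 0 - j ≠ 1)
            ↔ (y - j ≠ 1) := by
          simp
        exact if_congr (hcond.trans hr.symm) rfl rfl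

-- A's fold over the enumerated suffix equals the prev/next recursion
theorem fcFoldA (two_fold four_fold : List Int) :
    ∀ (l pre : List Int) (st : List Int × List Int × List Int),
    (PySem.List.enumerate l (pre.length : Int)).foldl
        (fcStep (pre ++ l) two_fold four_fold ((pre ++ l).length : Int)) st
    = fcRecA two_fold four_fold pre.getLast? l st := by
  intro l
  induction l with
  | nil => intro pre st; simp [PySem.List.enumerate_nil, fcRecA]
  | cons j rest ih =>
    intro pre st
    rw [PySem.List.enumerate_cons, List.foldl_cons, fcStep_eq]
    have h := ih (pre ++ [j]) (fcRecStep two_fold four_fold pre.getLast? j rest st)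
    rw [List.getLast?_concat] at h
    have h2 : ((pre ++ [j]).length : Int) = (pre.length : Int) + 1 := by simp
    rw [h2, List.append_assoc, List.singleton_append] at h
    rw [h]
    conv_rhs => rw [fcRecA]

-- startB on the first base of a singleton block is exactly B's block body for [s]
theorem fcStartB_singleton (two_fold four_fold : List Int) (s : Int)
    (st : List Int × List Int × List Int) :
    fcStartB two_fold four_fold s st = fcBlock two_fold four_fold st [s] := by
  simp only [fcStartB, fcBlock, List.headD_cons, List.getLastD_cons, List.tail_cons,
    List.length_cons, List.length_nil, List.append_nil]
  split_ifs <;> simp_all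

-- the run lemma: A's recursion walks a whole consecutive run into one end-adjusted append
theorem fcEndAdjust_append (e : Int) (l1 l2 : List Int) (h : 2 ≤ l2.length) :
    fcEndAdjust e (l1 ++ l2) = l1 ++ fcEndAdjust e l2 := by
  have h1 : l2 ≠ [] := by intro hh; subst hh; simp at h
  have h2 : l2.dropLast ≠ [] := by
    intro hh
    have := congrArg List.length hh
    simp [List.length_dropLast] at this
    omega
  simp only [fcEndAdjust]
  split_ifs
  · rw [List.dropLast_append_of_ne_nil h1]
  · rw [List.dropLast_append_of_ne_nil h1, List.dropLast_append_of_ne_nil h2]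
  · rfl

theorem fcRecA_chain (two_fold four_fold : List Int) :
    ∀ (tl : List Int) (p : Int) (rest fp t2 t4 : List Int),
    fcConsec p tl → tl ≠ [] → (rest = [] ∨ rest.headD 0 - tl.getLastD p ≠ 1) →
    fcRecA two_fold four_fold (some p) (tl ++ rest) (fp, t2, t4)
    = fcRecA two_fold four_fold (some (tl.getLastD p)) rest
        (fcEndAdjust (tl.getLastD p) (fp ++ tl), t2, t4) := by
  intro tl
  induction tl with
  | nil => intro p rest fp t2 t4 _ hne _; exact absurd rfl hne
  | cons x tl' ih =>
    intro p rest fp t2 t4 hcons _ hrest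
    obtain ⟨hx, hc'⟩ := hcons
    cases tl' with
    | nil =>
      simp only [List.singleton_append]
      rw [fcRecA]
      have hnx : ¬ (x - p ≠ 1) := by omega
      simp only [List.getLastD_cons, List.getLastD_nil] at hrest ⊢
      simp only [fcRecStep, if_neg hnx, if_pos hrest, fcEndB_eq]
    | cons y t =>
      obtain ⟨hy, hc''⟩ := hc'
      simp only [List.cons_append]
      rw [fcRecA]
      have hnx : ¬ (x - p ≠ 1) := by omega
      have hmid : ¬ ((y :: (t ++ rest)) = [] ∨ (y :: (t ++ rest)).headD 0 - x ≠ 1) := by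
        simp only [List.headD_cons]
        intro hor
        rcases hor with h1 | h1
        · exact List.cons_ne_nil _ _ h1
        · omega
      simp only [fcRecStep, if_neg hnx, if_neg hmid]
      have h := ih x rest (fp ++ [x]) t2 t4 ⟨hy, hc''⟩ (List.cons_ne_nil _ _)
        (by simpa only [List.getLastD_cons] using hrest)
      simp only [List.getLastD_cons] at h ⊢
      simp only [List.cons_append] at h
      rw [h]
      simp only [List.append_assoc, List.cons_append, List.nil_append]

-- one whole block of A's recursion is one fcBlock step
theorem fcEndAdjust_fold (e : Int) (l : List Int) :
    (if PySem.Int.mod e 3 = 0 then l.dropLast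
     else if PySem.Int.mod e 3 = 1 then l.dropLast.dropLast else l) = fcEndAdjust e l := rfl

def fcHeadPart (s : Int) : List Int :=
  if PySem.Int.mod s 3 = 1 then [s - 1, s]
  else if PySem.Int.mod s 3 = 2 then [s - 2, s - 1, s] else [s]

def fcHeadC (s : Int) : Option Int :=
  if PySem.Int.mod s 3 = 1 then some (s - 1)
  else if PySem.Int.mod s 3 = 2 then some (s - 2) else none

theorem fcHeadPart_len (s : Int) : 1 ≤ (fcHeadPart s).length := by
  simp only [fcHeadPart]; split_ifs <;> simp

theorem fcBlock_hc (s : Int) :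
    (if PySem.Int.mod s 3 = 1 then (([s - 1, s] : List Int), some (s - 1))
     else if PySem.Int.mod s 3 = 2 then ([s - 2, s - 1, s], some (s - 2))
     else ([s], none)) = (fcHeadPart s, fcHeadC s) := by
  simp only [fcHeadPart, fcHeadC]; split_ifs <;> rfl

theorem fcStartB_fst (two_fold four_fold : List Int) (s : Int)
    (st : List Int × List Int × List Int) :
    (fcStartB two_fold four_fold s st).1 = st.1 ++ fcHeadPart s := by
  simp only [fcStartB, fcHeadPart]
  split_ifs <;> simp

theorem fcStartB_snd (two_fold four_fold : List Int) (s : Int)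
    (st : List Int × List Int × List Int) :
    (fcStartB two_fold four_fold s st).2
    = (match fcHeadC s with
       | none => (st.2.1, st.2.2)
       | some c =>
         if c ∈ two_fold then (st.2.1 ++ [c], st.2.2)
         else if c ∈ four_fold then (st.2.1, st.2.2 ++ [c])
         else (st.2.1, st.2.2)) := by
  simp only [fcStartB, fcHeadC]
  split_ifs <;> simp_all

theorem fcBlock_cons₂ (two_fold four_fold : List Int)
    (st : List Int × List Int × List Int) (s : Int) (tl : List Int) (h : tl ≠ []) :
    fcBlock two_fold four_fold st (s :: tl)
    = (fcEndAdjust (tl.getLastD s) ((fcStartB two_fold four_fold s st).1 ++ tl),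
       (fcStartB two_fold four_fold s st).2.1, (fcStartB two_fold four_fold s st).2.2) := by
  have htl : 1 ≤ tl.length := by
    cases tl with
    | nil => exact absurd rfl h
    | cons a l => simp
  have hlen : 2 ≤ (s :: tl).length := by simp only [List.length_cons]; omega
  have hhp : 2 ≤ (fcHeadPart s ++ tl).length := by
    have := fcHeadPart_len s
    simp only [List.length_append]; omega
  simp only [fcBlock, List.headD_cons, List.getLastD_cons, List.tail_cons, if_pos hlen,
    fcBlock_hc, fcEndAdjust_fold]
  rw [fcStartB_fst, List.append_assoc, fcEndAdjust_append _ _ _ hhp]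
  have hS := fcStartB_snd two_fold four_fold s st
  simp only [Prod.mk.injEq]
  exact ⟨trivial, by rw [hS], by rw [hS]⟩

theorem fcRecA_block (two_fold four_fold : List Int) (s : Int) (tl rest : List Int)
    (prev : Option Int) (st : List Int × List Int × List Int)
    (hc : fcConsec s tl)
    (hprev : ∀ p, prev = some p → s - p ≠ 1)
    (hrest : rest = [] ∨ rest.headD 0 - tl.getLastD s ≠ 1) :
    fcRecA two_fold four_fold prev (s :: (tl ++ rest)) st
    = fcRecA two_fold four_fold (some (tl.getLastD s)) rest
        (fcBlock two_fold four_fold st (s :: tl)) := by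
  rw [fcRecA]
  have hstep : fcRecStep two_fold four_fold prev s (tl ++ rest) st
      = fcStartB two_fold four_fold s st := by
    cases prev with
    | none => rfl
    | some p => exact if_pos (hprev p rfl)
  rw [hstep]
  cases tl with
  | nil =>
    simp only [List.nil_append, List.getLastD_nil]
    rw [fcStartB_singleton]
  | cons x tl'' =>
    rw [fcBlock_cons₂ two_fold four_fold st s (x :: tl'') (List.cons_ne_nil _ _)]
    have h := fcRecA_chain two_fold four_fold (x :: tl'') s rest
      (fcStartB two_fold four_fold s st).1 (fcStartB two_fold four_fold s st).2.1
      (fcStartB two_fold four_fold s st).2.2 hc (List.cons_ne_nil _ _) hrest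
    simpa using h

theorem fcTakeRun_append (p : Int) (xs : List Int) :
    (fcTakeRun p xs).1 ++ (fcTakeRun p xs).2 = xs := by
  induction xs generalizing p with
  | nil => simp [fcTakeRun]
  | cons y ys ih =>
    simp only [fcTakeRun]
    split
    · simp [ih y]
    · simp

theorem fcTakeRun_consec (p : Int) (xs : List Int) : fcConsec p (fcTakeRun p xs).1 := by
  induction xs generalizing p with
  | nil => simp [fcTakeRun, fcConsec]
  | cons y ys ih =>
    simp only [fcTakeRun]
    split
    · next hy => exact ⟨by omega, ih y⟩
    · simp [fcConsec]

theorem fcTakeRun_rest (p : Int) (xs : List Int) :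
    (fcTakeRun p xs).2 = [] ∨
      (fcTakeRun p xs).2.headD 0 - ((fcTakeRun p xs).1.getLastD p) ≠ 1 := by
  induction xs generalizing p with
  | nil => left; simp [fcTakeRun]
  | cons y ys ih =>
    simp only [fcTakeRun]
    split
    · simp only [List.getLastD_cons]
      exact ih y
    · next hy => right; simpa using hy

-- A's recursion equals B's fold over the maximal runs
theorem fcRecA_runs (two_fold four_fold : List Int) :
    ∀ (n : Nat) (l : List Int), l.length ≤ n →
    ∀ (prev : Option Int) (st : List Int × List Int × List Int),
    (∀ p, prev = some p → l = [] ∨ l.headD 0 - p ≠ 1) →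
    fcRecA two_fold four_fold prev l st
    = (fcRuns l).foldl (fcBlock two_fold four_fold) st := by
  intro n
  induction n with
  | zero =>
    intro l hl prev st _
    have : l = [] := List.eq_nil_of_length_eq_zero (Nat.le_zero.mp hl)
    subst this
    simp [fcRecA, fcRuns]
  | succ n ih =>
    intro l hl prev st H
    cases l with
    | nil => simp [fcRecA, fcRuns]
    | cons x xs =>
      have hsplit := fcTakeRun_append x xs
      have hcons := fcTakeRun_consec x xs
      have hrest := fcTakeRun_rest x xs
      rw [fcRuns, List.foldl_cons]
      have hprev : ∀ p, prev = some p → x - p ≠ 1 := by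
        intro p hp
        rcases H p hp with h | h
        · exact absurd h (List.cons_ne_nil _ _)
        · simpa using h
      have hx : x :: xs = x :: ((fcTakeRun x xs).1 ++ (fcTakeRun x xs).2) := by
        rw [hsplit]
      rw [hx, fcRecA_block two_fold four_fold x _ _ prev st hcons hprev hrest]
      refine ih (fcTakeRun x xs).2 ?_ _ _ ?_
      · have h1 := fcTakeRun_len x xs
        simp only [List.length_cons] at hl
        omega
      · intro p hp
        rcases hrest with h | h
        · exact Or.inl h
        · right
          injection hp with hp'
          rw [← hp']
          exact h

-- ===== VERDICT (by name: the statement is the Claim_ definition above) =====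
theorem fill_codons_spec : Claim_equal_fill_codons := by
  intro mp two_fold four_fold _
  unfold Spec_fill_codons fill_codons fill_codons_alt
  simp only [List.map_id']
  have h0 := fcFoldA two_fold four_fold mp [] ([], [], [])
  simp only [List.nil_append, List.length_nil, Nat.cast_zero, List.getLast?_nil] at h0
  rw [h0]
  exact fcRecA_runs two_fold four_fold mp.length mp le_rfl none _ (by simp)
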